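-- pv_equiv track=rewrite | github.com/damsleth/owa-cal | owa_cal/ics.py | _unescape_ical_text
-- ===== SOURCE A (Python) =====
-- _TEXT_ESCAPES = {'n': '\n', 'N': '\n', '\\': '\\', ',': ',', ';': ';'}
--
-- def _unescape_ical_text(s):
--     """Decode RFC 5545 TEXT escapes: \\n, \\N, \\\\, \\,, \\;."""
--     if '\\' not in s:
--         return s
--     out = []
--     i = 0
--     while i < len(s):
--         ch = s[i]
--         if ch == '\\' and i + 1 < len(s):
--             nxt = s[i + 1]
--             out.append(_TEXT_ESCAPES.get(nxt, nxt))
--             i += 2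
--         else:
--             out.append(ch)
--             i += 1
--     return ''.join(out)
-- ===== SOURCE B (Python) =====
-- _TEXT_ESCAPES = {'n': '\n', 'N': '\n', '\\': '\\', ',': ',', ';': ';'}
--
-- def _unescape_ical_text(s):
--     """Decode RFC 5545 TEXT escapes in two stages: split the string on
--     backslashes, then stitch the pieces back, decoding each piece's first
--     character (an empty piece signals an escaped backslash, which makes the
--     following piece literal; a final empty piece is a trailing lone backslash)."""
--     parts = s.split('\\')
--     if len(parts) == 1:
--         return s
--     out = [parts[0]]
--     j = 1
--     while j < len(parts):
--         p = parts[j]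
--         if p:
--             out.append(_TEXT_ESCAPES.get(p[0], p[0]) + p[1:])
--             j += 1
--         elif j + 1 < len(parts):
--             out.append('\\' + parts[j + 1])
--             j += 2
--         else:
--             out.append('\\')
--             j += 1
--     return ''.join(out)
-- ===== Notes on version B (the rewrite author's own statement) =====
-- stated objective: alternative
-- what changed: Replaces A's character-by-character while-loop scanner with a two-stage split-and-stitch: split the string on backslashes once, then rejoin the pieces, decoding each piece's first character (an empty piece marks an escaped backslash, which makes the following piece literal).
import Mathlib
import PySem

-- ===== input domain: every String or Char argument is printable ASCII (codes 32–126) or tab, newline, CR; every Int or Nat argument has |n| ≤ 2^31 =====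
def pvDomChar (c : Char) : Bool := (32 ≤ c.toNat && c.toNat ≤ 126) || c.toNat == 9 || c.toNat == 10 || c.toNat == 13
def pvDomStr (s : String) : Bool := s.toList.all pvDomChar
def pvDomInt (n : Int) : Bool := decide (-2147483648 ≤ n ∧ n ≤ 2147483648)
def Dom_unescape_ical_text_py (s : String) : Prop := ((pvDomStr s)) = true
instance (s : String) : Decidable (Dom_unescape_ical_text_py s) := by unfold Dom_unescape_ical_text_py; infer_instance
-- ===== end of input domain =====

-- B replaces A's character-by-character scanner with a split-on-backslash pass followed
-- by a stitching pass over the pieces (alternative decomposition; same cost).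

-- ===== PORT A =====
-- _TEXT_ESCAPES: all keys and values are single characters, so the dict is ported at Char granularity (exact).
def pvTextEscapes : PySem.Dict Char Char :=
  PySem.Dict.ofList [('n', '\n'), ('N', '\n'), ('\\', '\\'), (',', ','), (';', ';')]

-- the while loop of A: index i over the char list, out accumulated front-to-back
def pvGoA (cs : List Char) (i : Nat) : List Char :=
  if h : i < cs.length then
    let ch := cs[i]
    if hch : ch = '\\' ∧ i + 1 < cs.length then
      let nxt := cs[i + 1]'hch.2
      pvTextEscapes.getD nxt nxt :: pvGoA cs (i + 2)
    else
      ch :: pvGoA cs (i + 1)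
  else []
termination_by cs.length - i
decreasing_by all_goals omega

def unescape_ical_text_py (s : String) : String :=
  if PySem.Str.isIn "\\" s = false then s
  else String.ofList (pvGoA s.toList 0)

-- ===== PORT B =====
-- the while loop over parts with index j, ported at Char granularity as structural
-- recursion on the remaining parts (j += 1 drops one part, j += 2 drops two);
-- p[0]/p[1:] becomes the head/tail of the piece, '\\' + parts[j+1] a cons.
def pvStitch : List (List Char) → List (List Char)
  | [] => []
  | p :: rest =>
    match p with
    | c :: cs => (pvTextEscapes.getD c c :: cs) :: pvStitch rest
    | [] =>
      match rest with
      | q :: rest' => ('\\' :: q) :: pvStitch rest'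
      | [] => [['\\']]

def unescape_ical_text_py_alt (s : String) : String :=
  let parts := PySem.Chars.splitOn s.toList "\\".toList   -- s.split('\\')
  if parts.length = 1 then s
  else
    -- out = [parts[0]] then the loop from j = 1; ''.join(out)
    String.ofList (PySem.Chars.join [] (parts.headD [] :: pvStitch parts.tail))

-- ===== PRECONDITION & SPEC =====
def Spec_unescape_ical_text_py (s : String) (out : String) : Prop := out = unescape_ical_text_py_alt s
instance (s : String) (out : String) : Decidable (Spec_unescape_ical_text_py s out) := by unfold Spec_unescape_ical_text_py; infer_instance

-- ===== CLAIM (what is proved, stated in full; the proofs are below) =====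
def Claim_equal_unescape_ical_text_py : Prop := ∀ (s : String), Dom_unescape_ical_text_py s → Spec_unescape_ical_text_py s (unescape_ical_text_py s)

-- ===== LEMMAS AND PROOFS =====

-- reference scanner (proof-side only): what A's index loop computes
def pvScan : List Char → List Char
  | [] => []
  | ch :: rest =>
    if ch = '\\' then
      match rest with
      | [] => ['\\']
      | nxt :: rest' => pvTextEscapes.getD nxt nxt :: pvScan rest'
    else ch :: pvScan rest

-- A's index loop from position i computes the scan of the suffix starting at i.
theorem pvGoA_eq_scan_drop (cs : List Char) (i : Nat) : pvGoA cs i = pvScan (cs.drop i) := by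
  induction' hn : cs.length - i using Nat.strong_induction_on with n ih generalizing i
  rw [pvGoA]
  by_cases h : i < cs.length
  · rw [List.drop_eq_getElem_cons h]
    by_cases hch : cs[i] = '\\' ∧ i + 1 < cs.length
    · simp only [dif_pos h, dif_pos hch]
      rw [List.drop_eq_getElem_cons hch.2, ih (cs.length - (i + 2)) (by omega) (i + 2) rfl]
      simp [pvScan, hch.1]
    · simp only [dif_pos h, dif_neg hch]
      rw [ih (cs.length - (i + 1)) (by omega) (i + 1) rfl]
      by_cases hb : cs[i] = '\\'
      · have hlen : ¬ i + 1 < cs.length := fun hl => hch ⟨hb, hl⟩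
        have : cs.drop (i + 1) = [] := List.drop_eq_nil_of_le (by omega)
        simp [pvScan, hb, this]
      · conv_rhs => rw [pvScan.eq_def]
        simp only [if_neg hb]
  · have : cs.drop i = [] := List.drop_eq_nil_of_le (by omega)
    simp [h, this, pvScan]

-- PySem's fuelled splitOn.go, for a single-character separator, is Mathlib's splitOnP.
theorem pvGo_eq_splitOnP (b : Char) (fuel : Nat) (l cur : List Char) (acc : List (List Char))
    (hf : l.length ≤ fuel) :
    PySem.Chars.splitOn.go [b] fuel l cur acc
      = acc.reverse ++ List.modifyHead (cur.reverse ++ ·) (l.splitOnP (· == b)) := by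
  induction fuel generalizing l cur acc with
  | zero =>
    have : l = [] := List.eq_nil_of_length_eq_zero (by omega)
    subst this
    simp [PySem.Chars.splitOn.go, List.splitOnP_nil]
  | succ fuel ih =>
    cases l with
    | nil => simp [PySem.Chars.splitOn.go, List.splitOnP_nil]
    | cons c rest =>
      rw [PySem.Chars.splitOn.go]
      by_cases hc : c = b
      · have hpre : List.isPrefixOf [b] (c :: rest) = true := by
          simp [List.isPrefixOf, hc]
        simp only [hpre, if_true]
        have hd : List.drop [b].length (c :: rest) = rest := rfl
        rw [hd, ih rest [] (cur.reverse :: acc) (by simp at hf; omega)]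
        simp only [List.splitOnP_cons, hc, beq_self_eq_true, if_true]
        obtain ⟨h, t, ht⟩ := List.exists_cons_of_ne_nil (List.splitOnP_ne_nil (· == b) rest)
        simp [ht]
      · have hpre : List.isPrefixOf [b] (c :: rest) = false := by
          simp [List.isPrefixOf]
          exact fun h => hc h.symm
        simp only [hpre, Bool.false_eq_true, if_false]
        rw [ih rest (c :: cur) acc (by simp at hf; omega)]
        simp only [List.splitOnP_cons, beq_iff_eq, hc, if_false]
        obtain ⟨h, t, ht⟩ := List.exists_cons_of_ne_nil (List.splitOnP_ne_nil (· == b) rest)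
        simp [ht]

theorem pvSplitOn_eq_splitOnP (b : Char) (cs : List Char) :
    PySem.Chars.splitOn cs [b] = cs.splitOnP (· == b) := by
  rw [PySem.Chars.splitOn, pvGo_eq_splitOnP b (cs.length + 1) cs [] [] (by omega)]
  obtain ⟨h, t, ht⟩ := List.exists_cons_of_ne_nil (List.splitOnP_ne_nil (· == b) cs)
  simp [ht]

theorem pvLength_splitOnP_eq_one_iff (b : Char) (cs : List Char) :
    (cs.splitOnP (· == b)).length = 1 ↔ b ∉ cs := by
  induction cs with
  | nil => simp [List.splitOnP_nil]
  | cons c rest ih =>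
    rw [List.splitOnP_cons]
    by_cases hc : c = b
    · subst hc
      simp only [beq_self_eq_true, if_true, List.length_cons]
      have hne := List.splitOnP_ne_nil (· == c) rest
      constructor
      · intro h
        exact absurd (List.length_eq_zero_iff.mp (by omega)) hne
      · intro h
        simp at h
    · simp only [beq_iff_eq, hc, if_false]
      obtain ⟨h, t, ht⟩ := List.exists_cons_of_ne_nil (List.splitOnP_ne_nil (· == b) rest)
      rw [ht] at ih ⊢
      rw [List.modifyHead_cons]
      have hcb : ¬ b = c := fun hx => hc hx.symm
      simp only [List.length_cons] at ih ⊢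
      simpa [List.mem_cons, hcb] using ih

-- ''.join is concatenation
theorem pvJoin_nil (ps : List (List Char)) : PySem.Chars.join [] ps = ps.flatten := by
  induction ps with
  | nil => simp [PySem.Chars.join, List.intercalate]
  | cons a t ih =>
    cases t with
    | nil => simp [PySem.Chars.join, List.intercalate]
    | cons b t' =>
      have h1 : List.intersperse ([] : List Char) (a :: b :: t')
          = a :: [] :: List.intersperse [] (b :: t') := rfl
      simp only [PySem.Chars.join, List.intercalate] at ih ⊢
      rw [h1]
      simp [ih]

-- the stitch of the split reproduces the scan
theorem pvScan_eq_stitch (cs p0 : List Char) (rest : List (List Char))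
    (hsplit : cs.splitOnP (· == '\\') = p0 :: rest) :
    pvScan cs = p0 ++ (pvStitch rest).flatten := by
  have hesc : pvTextEscapes.getD '\\' '\\' = '\\' := by decide
  induction' hn : cs.length using Nat.strong_induction_on with n ih generalizing cs p0 rest
  cases cs with
  | nil =>
    rw [List.splitOnP_nil] at hsplit
    injection hsplit with h1 h2
    subst h1; subst h2
    simp [pvScan, pvStitch]
  | cons c cs' =>
    rw [List.splitOnP_cons] at hsplit
    by_cases hc : c = '\\'
    · subst hc
      simp only [beq_self_eq_true, if_true] at hsplit
      injection hsplit with h1 h2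
      subst h1
      cases cs' with
      | nil =>
        rw [List.splitOnP_nil] at h2
        subst h2
        simp [pvScan, pvStitch]
      | cons nxt cs'' =>
        rw [List.splitOnP_cons] at h2
        obtain ⟨q2, rest2, hq2⟩ :=
          List.exists_cons_of_ne_nil (List.splitOnP_ne_nil (· == '\\') cs'')
        have hscan : pvScan cs'' = q2 ++ (pvStitch rest2).flatten :=
          ih cs''.length (by subst hn; simp only [List.length_cons]; omega) cs'' q2 rest2 hq2 rfl
        by_cases hn2 : nxt = '\\'
        · subst hn2
          simp only [beq_self_eq_true, if_true, hq2] at h2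
          subst h2
          simp [pvScan, pvStitch, hscan, hesc]
        · simp only [beq_iff_eq, hn2, if_false, hq2, List.modifyHead_cons] at h2
          subst h2
          simp [pvScan, pvStitch, hscan]
    · simp only [beq_iff_eq, hc, if_false] at hsplit
      obtain ⟨q, t, hq⟩ := List.exists_cons_of_ne_nil (List.splitOnP_ne_nil (· == '\\') cs')
      rw [hq, List.modifyHead_cons] at hsplit
      injection hsplit with h1 h2
      subst h1; subst h2
      have hscan : pvScan cs' = q ++ (pvStitch t).flatten :=
        ih cs'.length (by subst hn; simp) cs' q t hq rfl
      conv_lhs => rw [pvScan.eq_def]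
      simp [hc, hscan]

-- ===== VERDICT (by name: the statement is the Claim_ definition above) =====
theorem unescape_ical_text_py_spec : Claim_equal_unescape_ical_text_py := by
  intro s _
  unfold Spec_unescape_ical_text_py unescape_ical_text_py unescape_ical_text_py_alt
  have htl : ("\\".toList : List Char) = ['\\'] := rfl
  simp only [htl, pvSplitOn_eq_splitOnP '\\' s.toList]
  have hone := pvLength_splitOnP_eq_one_iff '\\' s.toList
  have hmem : PySem.Str.isIn "\\" s = false ↔ '\\' ∉ s.toList := by
    rw [PySem.Str.isIn_eq, PySem.Chars.isIn_eq_false_iff, htl]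
    rw [List.singleton_infix_iff]
  by_cases hb : '\\' ∈ s.toList
  · rw [if_neg (by rw [hmem]; simpa using hb), if_neg (by rw [hone]; simpa using hb)]
    obtain ⟨p0, rest, hps⟩ :=
      List.exists_cons_of_ne_nil (List.splitOnP_ne_nil (· == '\\') s.toList)
    rw [hps]
    simp only [List.headD_cons, List.tail_cons]
    rw [pvGoA_eq_scan_drop s.toList 0, List.drop_zero, pvScan_eq_stitch s.toList p0 rest hps,
       pvJoin_nil (p0 :: pvStitch rest), List.flatten_cons]
  · rw [if_pos (hmem.mpr hb), if_pos (hone.mpr hb)]
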